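-- pv_equiv track=rewrite | github.com/lpalbou/AbstractLLM | abstractllm/architectures/detection.py | normalize_model_name
-- ===== SOURCE A (Python) =====
-- def normalize_model_name(model_name: str) -> str:
--     """
--     Normalize model name for consistent architecture detection.
--
--     Args:
--         model_name: Raw model name from any provider
--
--     Returns:
--         Normalized model name
--     """
--     # Convert to lowercase
--     normalized = model_name.lower()
--
--     # Remove common prefixes
--     prefixes_to_remove = [
--         "mlx-community/",
--         "microsoft/",
--         "meta-llama/",
--         "mistralai/",
--         "google/",
--         "01-ai/",
--         "deepseek-ai/",
--         "qwen/",
--         "ibm-granite/",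
--         "codellama/",
--     ]
--
--     for prefix in prefixes_to_remove:
--         if normalized.startswith(prefix):
--             normalized = normalized[len(prefix):]
--             break
--
--     # Handle Ollama-style names (model:tag)
--     if ":" in normalized:
--         normalized = normalized.split(":")[0]
--
--     return normalized
-- ===== SOURCE B (Python) =====
-- _ORGS = frozenset({
--     "mlx-community", "microsoft", "meta-llama", "mistralai", "google",
--     "01-ai", "deepseek-ai", "qwen", "ibm-granite", "codellama",
-- })
--
--
-- def normalize_model_name(model_name: str) -> str:
--     """Normalize model name: lowercase, drop a known org prefix, drop an Ollama tag."""
--     name = model_name.lower()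
--     org, sep, rest = name.partition("/")
--     if sep and org in _ORGS:
--         name = rest
--     return name.partition(":")[0]
-- ===== Notes on version B (the rewrite author's own statement) =====
-- stated objective: idiomatic
-- what changed: Replaces the scan-with-break over ten prefix strings by a single partition at the first slash plus one frozenset lookup of the org segment, and replaces the membership-test-then-split tag handling by a partition at the first colon.
import Mathlib
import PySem

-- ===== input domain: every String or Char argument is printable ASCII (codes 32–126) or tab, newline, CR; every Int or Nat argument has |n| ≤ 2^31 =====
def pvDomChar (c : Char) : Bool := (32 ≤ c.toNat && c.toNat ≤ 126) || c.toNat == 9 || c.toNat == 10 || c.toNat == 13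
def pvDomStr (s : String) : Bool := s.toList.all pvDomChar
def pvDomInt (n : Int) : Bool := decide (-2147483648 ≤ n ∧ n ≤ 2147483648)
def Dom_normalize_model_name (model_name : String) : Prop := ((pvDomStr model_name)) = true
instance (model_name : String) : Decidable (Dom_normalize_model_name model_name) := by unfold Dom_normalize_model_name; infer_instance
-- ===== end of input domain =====

-- B replaces A's scan-with-break over ten prefix strings by one partition on '/' plus a set
-- lookup of the org segment, and the 'in'+split tag handling by partition(':') (idiomatic).

-- ===== PORT A =====
def pvPrefixesToRemove : List String :=
  ["mlx-community/", "microsoft/", "meta-llama/", "mistralai/", "google/",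
   "01-ai/", "deepseek-ai/", "qwen/", "ibm-granite/", "codellama/"]

-- the 'for prefix in prefixes_to_remove: if startswith: strip; break' loop
def pvStripPrefixLoop : List String → String → String
  | [], normalized => normalized
  | pfx :: rest, normalized =>
    if PySem.Str.startswith normalized pfx then
      PySem.Str.slice normalized (some (PySem.Str.len pfx)) none
    else pvStripPrefixLoop rest normalized

def normalize_model_name (model_name : String) : String :=
  let normalized := PySem.Str.lower model_name
  let normalized := pvStripPrefixLoop pvPrefixesToRemove normalized
  if PySem.Str.isIn ":" normalized then
    match PySem.Str.split? normalized ":" with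
    | some (h :: _) => h
    | _ => normalized   -- unreachable: sep ":" is nonempty, so split returns a nonempty list
  else normalized

-- ===== PORT B =====
def pvOrgList : List String :=
  ["mlx-community", "microsoft", "meta-llama", "mistralai", "google",
   "01-ai", "deepseek-ai", "qwen", "ibm-granite", "codellama"]

def pvOrgs : PySem.Set String := PySem.Set.ofList pvOrgList

-- hand-port of str.partition (exact for nonempty sep, the only way B uses it)
def pyPartition (s sep : String) : String × String × String :=
  let i := PySem.Str.find s sep
  if i = -1 then (s, "", "")
  else (PySem.Str.slice s none (some i), sep,
        PySem.Str.slice s (some (i + PySem.Str.len sep)) none)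

def normalize_model_name_alt (model_name : String) : String :=
  let name := PySem.Str.lower model_name
  let t := pyPartition name "/"
  let name := if t.2.1 ≠ "" ∧ PySem.Set.contains pvOrgs t.1 = true then t.2.2 else name
  (pyPartition name ":").1

-- ===== PRECONDITION & SPEC =====
def Spec_normalize_model_name (model_name : String) (out : String) : Prop := out = normalize_model_name_alt model_name
instance (model_name : String) (out : String) : Decidable (Spec_normalize_model_name model_name out) := by unfold Spec_normalize_model_name; infer_instance

-- ===== CLAIM (what is proved, stated in full; the proofs are below) =====
def Claim_equal_normalize_model_name : Prop := ∀ (model_name : String), Dom_normalize_model_name model_name → Spec_normalize_model_name model_name (normalize_model_name model_name)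

-- ===== LEMMAS AND PROOFS =====

theorem pv_find_go_singleton (c : Char) (l : List Char) (k : ℕ) :
    PySem.Chars.find.go [c] l k =
      if c ∈ l then ((k : ℤ) + (l.takeWhile (· ≠ c)).length) else -1 := by
  induction l generalizing k with
  | nil => simp [PySem.Chars.find.go]
  | cons h t ih =>
    rw [PySem.Chars.find.go]
    by_cases hc : h = c
    · subst hc; simp [List.isPrefixOf]
    · simp [List.isPrefixOf, hc, ih, Ne.symm hc]
      by_cases hm : c ∈ t <;> simp [hm, add_comm, add_assoc]
theorem pv_find_singleton (c : Char) (l : List Char) :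
    PySem.Chars.find l [c] =
      if c ∈ l then ((l.takeWhile (· ≠ c)).length : ℤ) else -1 := by
  simp [PySem.Chars.find, pv_find_go_singleton]
theorem pv_take_takeWhile (p : Char → Bool) (l : List Char) :
    l.take (l.takeWhile p).length = l.takeWhile p := by
  induction l with
  | nil => rfl
  | cons h t ih => by_cases hp : p h <;> simp [hp, ih]
theorem pv_splitOn_go_head (c : Char) (fuel : ℕ) (l cur : List Char) (acc : List (List Char))
    (h : l.length < fuel) :
    ∃ rest, PySem.Chars.splitOn.go [c] fuel l cur acc =
      acc.reverse ++ (cur.reverse ++ l.takeWhile (· ≠ c)) :: rest := by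
  induction fuel generalizing l cur acc with
  | zero => omega
  | succ m ih =>
    cases l with
    | nil => exact ⟨[], by simp [PySem.Chars.splitOn.go]⟩
    | cons x t =>
      rw [PySem.Chars.splitOn.go]
      by_cases hc : x = c
      · subst hc
        simp only [List.isPrefixOf, Bool.and_true, beq_self_eq_true, if_pos]
        obtain ⟨r, hr⟩ := ih t [] (cur.reverse :: acc) (by simp at h ⊢; omega)
        exact ⟨t.takeWhile (· ≠ x) :: r, by simp [hr]⟩
      · have hp : [c].isPrefixOf (x :: t) = false := by
          simp [List.isPrefixOf]; exact fun hh => absurd hh.symm hc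
        rw [hp]
        simp only [Bool.false_eq_true, if_false]
        obtain ⟨r, hr⟩ := ih t (x :: cur) acc (by simp at h ⊢; omega)
        exact ⟨r, by simp [hr, hc]⟩
theorem pv_splitOn_head (c : Char) (l : List Char) :
    ∃ rest, PySem.Chars.splitOn l [c] = l.takeWhile (· ≠ c) :: rest := by
  obtain ⟨r, hr⟩ := pv_splitOn_go_head c (l.length+1) l [] [] (by omega)
  exact ⟨r, by simpa using hr⟩

theorem pv_tag_eq (s : String) :
    (if PySem.Str.isIn ":" s then
      match PySem.Str.split? s ":" with
      | some (h :: _) => h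
      | _ => s
     else s) = (pyPartition s ":").1 := by
  have htl : (":" : String).toList = [':'] := by decide
  by_cases hm : ':' ∈ s.toList
  · have hin : PySem.Str.isIn ":" s = true := by
      simp [PySem.Str.isIn, htl, PySem.Chars.isIn_iff_infix, List.singleton_infix_iff, hm]
    obtain ⟨r, hr⟩ := pv_splitOn_head ':' s.toList
    have hsplit : PySem.Str.split? s ":" =
        some (String.ofList (s.toList.takeWhile (· ≠ ':')) :: r.map String.ofList) := by
      simp [PySem.Str.split?, PySem.Chars.split?, htl, hr]
    have hfind : PySem.Chars.find s.toList [':'] = ((s.toList.takeWhile (· ≠ ':')).length : ℤ) := by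
      simp [pv_find_singleton, hm]
    rw [hin, hsplit]
    simp only [pyPartition, PySem.Str.find, htl, hfind]
    have hne : (((s.toList.takeWhile (· ≠ ':')).length : ℤ)) ≠ -1 := by omega
    rw [if_neg hne]
    simp [PySem.Str.slice, PySem.List.slice_to_natCast, pv_take_takeWhile]
  · have hin : PySem.Str.isIn ":" s = false := by
      simp [PySem.Str.isIn, htl, PySem.Chars.isIn_eq_false_iff, List.singleton_infix_iff, hm]
    have hfind : PySem.Chars.find s.toList [':'] = -1 := by
      simp [pv_find_singleton, hm]
    rw [hin]
    simp [pyPartition, PySem.Str.find, htl, hfind]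

theorem pv_head_dropWhile (p : Char → Bool) (l : List Char) (d : Char) (ds : List Char)
    (h : l.dropWhile p = d :: ds) : p d = false := by
  induction l with
  | nil => simp at h
  | cons x t ih =>
    rw [List.dropWhile_cons] at h
    split at h
    · exact ih h
    · rename_i hx; cases h; simpa using hx

theorem pv_prefix_iff (o l : List Char) (ho : '/' ∉ o) :
    PySem.Chars.startswith l (o ++ ['/']) = true ↔
      ('/' ∈ l ∧ l.takeWhile (· ≠ '/') = o) := by
  rw [PySem.Chars.startswith_iff]
  constructor
  · rintro ⟨t, rfl⟩
    refine ⟨by simp, ?_⟩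
    rw [List.append_assoc, List.takeWhile_append_of_pos ?_]
    · simp
    · intro a ha; simpa using fun hh => ho (by rwa [hh] at ha)
  · rintro ⟨hm, rfl⟩
    cases hd : l.dropWhile (· ≠ '/') with
    | nil =>
      exfalso
      have := List.takeWhile_append_dropWhile (p := (· ≠ '/')) (l := l)
      rw [hd] at this; simp at this
      exact this '/' hm rfl
    | cons d ds =>
      have hdeq : d = '/' := by simpa using pv_head_dropWhile _ _ _ _ hd
      have h2 := List.takeWhile_append_dropWhile (p := (· ≠ '/')) (l := l)
      rw [hd, hdeq] at h2
      refine ⟨ds, ?_⟩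
      conv_rhs => rw [← h2]
      simp


theorem pv_loop_eq (orgs : List String) (s : String)
    (h : ∀ o ∈ orgs, '/' ∉ o.toList) :
    pvStripPrefixLoop (orgs.map (· ++ "/")) s =
      (if '/' ∈ s.toList ∧ String.ofList (s.toList.takeWhile (· ≠ '/')) ∈ orgs then
        PySem.Str.slice s (some (((s.toList.takeWhile (· ≠ '/')).length : ℤ) + 1)) none
       else s) := by
  induction orgs with
  | nil => simp [pvStripPrefixLoop]
  | cons o os ih =>
    simp only [List.map_cons, pvStripPrefixLoop]
    have hsw : PySem.Str.startswith s (o ++ "/") = PySem.Chars.startswith s.toList (o.toList ++ ['/']) := by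
      simp [PySem.Str.startswith]
    by_cases hp : PySem.Chars.startswith s.toList (o.toList ++ ['/']) = true
    · obtain ⟨hm, ht⟩ := (pv_prefix_iff _ _ (h o (by simp))).mp hp
      rw [hsw, if_pos hp, if_pos ⟨hm, by rw [ht]; simp⟩]
      have ht2 : List.takeWhile (fun x => !decide (x = '/')) s.toList = o.toList := by
        rw [← ht]; simp
      simp [PySem.Str.len, ht2]
    · rw [hsw, if_neg hp, ih (fun o' ho' => h o' (by simp [ho']))]
      by_cases hm : '/' ∈ s.toList
      · have hne : String.ofList (s.toList.takeWhile (fun x => !decide (x = '/'))) ≠ o := by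
          intro he
          refine hp ((pv_prefix_iff _ _ (h o (by simp))).mpr ⟨hm, ?_⟩)
          have : (fun x => decide (x ≠ '/')) = (fun x : Char => !decide (x = '/')) := by
            funext x; simp
          rw [this, ← he]; simp
        simp [hm, hne]
      · simp [hm]

theorem pv_strip_eq (s : String) :
    pvStripPrefixLoop pvPrefixesToRemove s =
      (let t := pyPartition s "/"
       if t.2.1 ≠ "" ∧ PySem.Set.contains pvOrgs t.1 = true then t.2.2 else s) := by
  have hpf : pvPrefixesToRemove = pvOrgList.map (· ++ "/") := by decide
  have hfree : ∀ o ∈ pvOrgList, '/' ∉ o.toList := by decide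
  rw [hpf, pv_loop_eq _ _ hfree]
  have htl : ("/" : String).toList = ['/'] := by decide
  by_cases hm : '/' ∈ s.toList
  · have hfind : PySem.Chars.find s.toList ['/'] = ((s.toList.takeWhile (· ≠ '/')).length : ℤ) := by
      simp [pv_find_singleton, hm]
    have hne : (((s.toList.takeWhile (· ≠ '/')).length : ℤ)) ≠ -1 := by omega
    simp only [pyPartition, PySem.Str.find, htl, hfind]
    rw [if_neg hne]
    have ht1 : PySem.Str.slice s none (some ((s.toList.takeWhile (· ≠ '/')).length : ℤ)) =
        String.ofList (s.toList.takeWhile (· ≠ '/')) := by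
      simp [PySem.Str.slice, PySem.List.slice_to_natCast, pv_take_takeWhile]
    have hcont : ∀ x : String, PySem.Set.contains pvOrgs x = true ↔ x ∈ pvOrgList := by
      intro x
      rw [PySem.Set.contains_iff, pvOrgs, PySem.Set.mem_ofList]
    simp only [ht1, hcont, PySem.Str.len, htl]
    simp [hm]
  · have hfind : PySem.Chars.find s.toList ['/'] = -1 := by
      simp [pv_find_singleton, hm]
    simp [pyPartition, PySem.Str.find, htl, hfind, hm]

-- ===== VERDICT (by name: the statement is the Claim_ definition above) =====
theorem normalize_model_name_spec : Claim_equal_normalize_model_name := by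
  intro m _
  unfold Spec_normalize_model_name normalize_model_name normalize_model_name_alt
  rw [pv_tag_eq, pv_strip_eq]
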